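-- pv_equiv track=rewrite | github.com/Arbut-himself/portfolio | python/freecodecamp_daily_coding_challenges/2025_november/fcc_dcc_2025-11-01.py | count_letter_values
-- ===== SOURCE A (Python) =====
-- def count_letter_values(input: str) -> int:
--     count = 0
--     for character in input:
--         if character.isupper():
--             count += (ord(character)-38)
--         else:
--             count += (ord(character)-96)
--     return count
-- ===== SOURCE B (Python) =====
-- def count_letter_values(input: str) -> int:
--     total = sum(map(ord, input))
--     uppers = sum(1 for c in input if c.isupper())
--     return total - 38 * uppers - 96 * (len(input) - uppers)
-- ===== Notes on version B (the rewrite author's own statement) =====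
-- stated objective: alternative
-- what changed: Replaces the per-character conditional accumulation with independent aggregates (sum of ord values and uppercase count) combined by the closed-form total - 38*U - 96*(len - U).
import Mathlib
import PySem

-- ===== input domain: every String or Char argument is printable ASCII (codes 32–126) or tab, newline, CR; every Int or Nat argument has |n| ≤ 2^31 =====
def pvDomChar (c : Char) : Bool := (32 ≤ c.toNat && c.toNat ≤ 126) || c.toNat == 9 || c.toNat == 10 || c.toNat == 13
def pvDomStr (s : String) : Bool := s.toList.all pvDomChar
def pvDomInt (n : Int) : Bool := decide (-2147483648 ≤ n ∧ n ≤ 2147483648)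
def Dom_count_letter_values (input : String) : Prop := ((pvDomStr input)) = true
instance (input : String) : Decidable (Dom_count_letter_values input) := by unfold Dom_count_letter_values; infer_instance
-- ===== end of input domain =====

-- B replaces A's conditional accumulation loop by independent aggregates (ord-sum, uppercase count) combined algebraically; same cost, different decomposition.

-- ===== PORT A =====
def count_letter_values (input : String) : Int :=
  input.toList.foldl
    (fun count character =>
      if PySem.Chars.isupper character then count + ((character.toNat : Int) - 38)
      else count + ((character.toNat : Int) - 96))
    0

-- ===== PORT B =====
def count_letter_values_alt (input : String) : Int :=
  let total : Int := (input.toList.map (fun c => (c.toNat : Int))).sum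
  let uppers : Int := (input.toList.filter (fun c => PySem.Chars.isupper c)).length
  total - 38 * uppers - 96 * ((input.toList.length : Int) - uppers)

-- ===== PRECONDITION & SPEC =====
def Spec_count_letter_values (input : String) (out : Int) : Prop := out = count_letter_values_alt input
instance (input : String) (out : Int) : Decidable (Spec_count_letter_values input out) := by unfold Spec_count_letter_values; infer_instance

-- ===== CLAIM (what is proved, stated in full; the proofs are below) =====
def Claim_equal_count_letter_values : Prop := ∀ (input : String), Dom_count_letter_values input → Spec_count_letter_values input (count_letter_values input)

-- ===== LEMMAS AND PROOFS =====

theorem count_letter_values_fold_eq (cs : List Char) (acc : Int) :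
    cs.foldl
      (fun count character =>
        if PySem.Chars.isupper character then count + ((character.toNat : Int) - 38)
        else count + ((character.toNat : Int) - 96))
      acc
    = acc + (cs.map (fun c => (c.toNat : Int))).sum
        - 38 * ((cs.filter (fun c => PySem.Chars.isupper c)).length : Int)
        - 96 * ((cs.length : Int) - ((cs.filter (fun c => PySem.Chars.isupper c)).length : Int)) := by
  induction cs generalizing acc with
  | nil => simp
  | cons c cs ih =>
    simp only [List.foldl_cons, List.map_cons, List.sum_cons, List.filter_cons, List.length_cons]
    by_cases h : PySem.Chars.isupper c
    · simp only [h, if_pos, ih]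
      push_cast [List.length_cons]
      ring
    · simp only [h, if_neg, Bool.false_eq_true, not_false_iff, ih]
      push_cast
      ring

-- ===== VERDICT (by name: the statement is the Claim_ definition above) =====
theorem count_letter_values_spec : Claim_equal_count_letter_values := by
  intro input _
  unfold Spec_count_letter_values count_letter_values count_letter_values_alt
  simpa using count_letter_values_fold_eq input.toList 0
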